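-- pv_equiv track=rewrite | github.com/dremdeveloper/programmers | 08 Queue/기출문제/159994.py | solution
-- ===== SOURCE A (Python) =====
-- def solution(cards1, cards2, goal):
--     #① goal의 문자열을 순차적으로 순회
--     for _ in range(len(goal)):
--         if len(cards1) > 0 and cards1[0] == goal[0]: # ② card1의 front와 일치하는 경우
--             cards1.pop(0)
--             goal.pop(0)
--         elif len(cards2) > 0 and cards2[0] == goal[0]:# ③ card2의 front와 일치하는 경우
--             cards2.pop(0)
--             goal.pop(0)
--     return "Yes" if len(goal) == 0 else "No"  # ④ goal이 비었으면 Yes 아니면 No를 반환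
-- ===== SOURCE B (Python) =====
-- def solution(cards1, cards2, goal):
--     # Index-based single scan; does not mutate the arguments (A pops them in place).
--     i = j = k = 0
--     n = len(goal)
--     while k < n:
--         if i < len(cards1) and cards1[i] == goal[k]:
--             i += 1
--         elif j < len(cards2) and cards2[j] == goal[k]:
--             j += 1
--         else:
--             break
--         k += 1
--     return "Yes" if k == n else "No"
-- ===== Notes on version B (the rewrite author's own statement) =====
-- stated objective: alternative
-- what changed: Replaces the fixed-count loop with repeated pop(0) on all three lists by a single early-exit scan with three index counters and no mutation.
import Mathlib
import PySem

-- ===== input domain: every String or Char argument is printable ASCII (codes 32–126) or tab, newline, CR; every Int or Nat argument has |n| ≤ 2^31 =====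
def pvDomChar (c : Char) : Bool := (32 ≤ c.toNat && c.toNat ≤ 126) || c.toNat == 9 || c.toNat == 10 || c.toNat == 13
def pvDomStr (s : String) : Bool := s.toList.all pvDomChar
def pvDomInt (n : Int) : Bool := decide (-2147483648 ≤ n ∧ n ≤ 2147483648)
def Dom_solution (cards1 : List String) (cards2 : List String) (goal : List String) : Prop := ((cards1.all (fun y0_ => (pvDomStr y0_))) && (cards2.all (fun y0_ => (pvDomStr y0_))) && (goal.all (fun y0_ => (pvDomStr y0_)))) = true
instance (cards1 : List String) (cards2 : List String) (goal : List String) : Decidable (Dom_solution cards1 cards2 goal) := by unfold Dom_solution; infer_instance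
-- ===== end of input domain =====

-- B replaces A's fixed-count loop (repeated pop(0) on all three lists) by a single
-- early-exit index scan; B does not mutate its arguments (A does):
-- the equivalence claimed here is about the RETURN value only.

-- ===== PORT A =====
-- one iteration of A's for-body acting on the state (cards1, cards2, goal);
-- list.pop(0) = tail (the pops are only reached on nonempty lists)
def solStep (st : List String × List String × List String) : List String × List String × List String :=
  if 0 < st.1.length ∧ st.1.headD "" = st.2.2.headD "" then (st.1.tail, st.2.1, st.2.2.tail)
  else if 0 < st.2.1.length ∧ st.2.1.headD "" = st.2.2.headD "" then (st.1, st.2.1.tail, st.2.2.tail)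
  else st

def solution (cards1 : List String) (cards2 : List String) (goal : List String) : String :=
  -- for _ in range(len(goal)): …
  let st := (List.range goal.length).foldl (fun s _ => solStep s) (cards1, cards2, goal)
  if st.2.2.length = 0 then "Yes" else "No"

-- ===== PORT B =====
-- B's while-loop: counters i j k over the unchanged lists, early exit on no match
def solAltLoop (c1 c2 g : List String) (n : Nat) (i j k : Nat) : Nat :=
  if k < n then
    if i < c1.length ∧ c1.getD i "" = g.getD k "" then solAltLoop c1 c2 g n (i+1) j (k+1)
    else if j < c2.length ∧ c2.getD j "" = g.getD k "" then solAltLoop c1 c2 g n i (j+1) (k+1)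
    else k
  else k
termination_by n - k

def solution_alt (cards1 : List String) (cards2 : List String) (goal : List String) : String :=
  let n := goal.length
  let k := solAltLoop cards1 cards2 goal n 0 0 0
  if k = n then "Yes" else "No"

-- ===== PRECONDITION & SPEC =====
def Spec_solution (cards1 : List String) (cards2 : List String) (goal : List String) (out : String) : Prop := out = solution_alt cards1 cards2 goal
instance (cards1 : List String) (cards2 : List String) (goal : List String) (out : String) : Decidable (Spec_solution cards1 cards2 goal out) := by unfold Spec_solution; infer_instance

-- ===== CLAIM (what is proved, stated in full; the proofs are below) =====
def Claim_equal_solution : Prop := ∀ (cards1 : List String) (cards2 : List String) (goal : List String), Dom_solution cards1 cards2 goal → Spec_solution cards1 cards2 goal (solution cards1 cards2 goal)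

-- ===== LEMMAS AND PROOFS =====

theorem foldl_range_iterate (m : Nat) (st : List String × List String × List String) :
    (List.range m).foldl (fun s _ => solStep s) st = solStep^[m] st := by
  induction m generalizing st with
  | zero => simp
  | succ m ih =>
    rw [List.range_succ, List.foldl_append, Function.iterate_succ_apply']
    simp only [List.foldl_cons, List.foldl_nil]
    rw [ih]

theorem headD_drop (l : List String) (i : Nat) : (l.drop i).headD "" = l.getD i "" := by
  simp [List.headD_eq_head?, List.head?_drop, List.getD_eq_getElem?_getD]

theorem length_pos_drop (l : List String) (i : Nat) : 0 < (l.drop i).length ↔ i < l.length := by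
  simp

-- B's counter never exceeds n
theorem solAltLoop_le (c1 c2 g : List String) (n i j k : Nat) (hk : k ≤ n) :
    solAltLoop c1 c2 g n i j k ≤ n := by
  unfold solAltLoop
  split
  · split
    · exact solAltLoop_le c1 c2 g n (i+1) j (k+1) (by omega)
    · split
      · exact solAltLoop_le c1 c2 g n i (j+1) (k+1) (by omega)
      · exact hk
  · exact hk
termination_by n - k

-- main invariant: after m more iterations of A's loop on the dropped state,
-- the remaining goal length is n minus B's final counter
theorem main_inv (c1 c2 g : List String) (m i j k : Nat)
    (hi : i ≤ c1.length) (hj : j ≤ c2.length) (hk : k ≤ g.length)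
    (hm : m = g.length - k) :
    (solStep^[m] (c1.drop i, c2.drop j, g.drop k)).2.2.length
      = g.length - solAltLoop c1 c2 g g.length i j k := by
  induction m generalizing i j k with
  | zero =>
    have hkn : k = g.length := by omega
    rw [Function.iterate_zero_apply]
    unfold solAltLoop
    simp [hkn]
  | succ m ih =>
    have hklt : k < g.length := by omega
    rw [Function.iterate_succ_apply]
    unfold solAltLoop
    rw [if_pos hklt]
    by_cases h1 : i < c1.length ∧ c1.getD i "" = g.getD k ""
    · rw [if_pos h1]
      have hstep : solStep (c1.drop i, c2.drop j, g.drop k)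
          = (c1.drop (i+1), c2.drop j, g.drop (k+1)) := by
        unfold solStep
        rw [if_pos]
        · simp [List.tail_drop]
        · exact ⟨(length_pos_drop c1 i).mpr h1.1, by rw [headD_drop, headD_drop]; exact h1.2⟩
      rw [hstep]
      exact ih (i+1) j (k+1) (by omega) hj (by omega) (by omega)
    · rw [if_neg h1]
      have hc1 : ¬ (0 < (c1.drop i).length ∧ (c1.drop i).headD "" = (g.drop k).headD "") := by
        rw [length_pos_drop, headD_drop, headD_drop]; exact h1
      by_cases h2 : j < c2.length ∧ c2.getD j "" = g.getD k ""
      · rw [if_pos h2]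
        have hstep : solStep (c1.drop i, c2.drop j, g.drop k)
            = (c1.drop i, c2.drop (j+1), g.drop (k+1)) := by
          unfold solStep
          rw [if_neg hc1, if_pos]
          · simp [List.tail_drop]
          · exact ⟨(length_pos_drop c2 j).mpr h2.1, by rw [headD_drop, headD_drop]; exact h2.2⟩
        rw [hstep]
        exact ih i (j+1) (k+1) hi (by omega) (by omega) (by omega)
      · rw [if_neg h2]
        have hc2 : ¬ (0 < (c2.drop j).length ∧ (c2.drop j).headD "" = (g.drop k).headD "") := by
          rw [length_pos_drop, headD_drop, headD_drop]; exact h2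
        have hfix : solStep (c1.drop i, c2.drop j, g.drop k) = (c1.drop i, c2.drop j, g.drop k) := by
          unfold solStep
          rw [if_neg hc1, if_neg hc2]
        rw [hfix, Function.iterate_fixed hfix]
        simp [List.length_drop]

-- ===== VERDICT (by name: the statement is the Claim_ definition above) =====
theorem solution_spec : Claim_equal_solution := by
  intro c1 c2 g _
  unfold Spec_solution solution solution_alt
  simp only [foldl_range_iterate]
  show (if (solStep^[g.length] (c1, c2, g)).2.2.length = 0 then "Yes" else "No")
      = (if solAltLoop c1 c2 g g.length 0 0 0 = g.length then "Yes" else "No")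
  have h := main_inv c1 c2 g g.length 0 0 0 (Nat.zero_le _) (Nat.zero_le _) (Nat.zero_le _) (by omega)
  simp only [List.drop_zero] at h
  rw [h]
  have hle := solAltLoop_le c1 c2 g g.length 0 0 0 (Nat.zero_le _)
  by_cases hk : solAltLoop c1 c2 g g.length 0 0 0 = g.length
  · rw [if_pos (by omega), if_pos hk]
  · rw [if_neg (by omega), if_neg hk]
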